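-- pv_equiv track=rewrite | github.com/bogdanstani/PythonBogdanS | Homework/DictionariesSets.py | get_dictionary_by_year
-- ===== SOURCE A (Python) =====
-- def get_dictionary_by_year(list_of_tuples):
--     return {
--         year: {
--             country: [sex, health_index]
--             for country, _, sex, health_index in list_of_tuples if _ == year
--         }
--         for country, year, sex, health_index in list_of_tuples
--     }
-- ===== SOURCE B (Python) =====
-- def get_dictionary_by_year(list_of_tuples):
--     result = {}
--     for country, year, sex, health_index in list_of_tuples:
--         result.setdefault(year, {})[country] = [sex, health_index]
--     return result
-- ===== Notes on version B (the rewrite author's own statement) =====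
-- stated objective: faster
-- what changed: Replaces the nested dict comprehensions (which rescan the whole list once per tuple) by a single pass that groups with setdefault, assigning each country entry directly.
import Mathlib
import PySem

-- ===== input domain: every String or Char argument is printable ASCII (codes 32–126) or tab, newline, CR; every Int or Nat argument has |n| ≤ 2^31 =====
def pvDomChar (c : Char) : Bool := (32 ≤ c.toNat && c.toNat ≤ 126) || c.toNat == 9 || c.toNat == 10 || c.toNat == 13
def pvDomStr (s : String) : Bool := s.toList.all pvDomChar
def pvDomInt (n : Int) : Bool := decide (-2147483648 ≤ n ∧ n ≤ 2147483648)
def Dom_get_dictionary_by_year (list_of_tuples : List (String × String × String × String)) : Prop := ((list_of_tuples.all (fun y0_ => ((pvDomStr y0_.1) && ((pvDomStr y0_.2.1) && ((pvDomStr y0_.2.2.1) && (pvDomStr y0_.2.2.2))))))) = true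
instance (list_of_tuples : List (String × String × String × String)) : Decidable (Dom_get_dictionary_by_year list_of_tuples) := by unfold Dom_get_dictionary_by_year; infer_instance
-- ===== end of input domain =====

-- B replaces A's nested dict comprehensions (one full rescan per tuple) by a single setdefault grouping pass; faster (asymptotic).


-- ===== PORT A =====
-- inner dict comprehension: {country: [sex, health_index] for country, _, sex, health_index in list_of_tuples if _ == year}
def pvInnerA (list_of_tuples : List (String × String × String × String)) (year : String) :
    PySem.Dict String (List String) :=
  list_of_tuples.foldl
    (fun d t => if t.2.1 = year then d.insert t.1 [t.2.2.1, t.2.2.2] else d)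
    PySem.Dict.empty

-- outer dict comprehension: {year: <inner> for country, year, sex, health_index in list_of_tuples}
def get_dictionary_by_year (list_of_tuples : List (String × String × String × String)) :
    List (String × List (String × List String)) :=
  (list_of_tuples.foldl
      (fun d t => d.insert t.2.1 (pvInnerA list_of_tuples t.2.1))
      PySem.Dict.empty).items.map (fun p => (p.1, p.2.items))

-- ===== PORT B =====
-- single pass: result.setdefault(year, {})[country] = [sex, health_index]  (= Dict.modify year {} (insert country …))
def get_dictionary_by_year_alt (list_of_tuples : List (String × String × String × String)) :
    List (String × List (String × List String)) :=
  (list_of_tuples.foldl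
      (fun d t => d.modify t.2.1 PySem.Dict.empty (fun inner => inner.insert t.1 [t.2.2.1, t.2.2.2]))
      PySem.Dict.empty).items.map (fun p => (p.1, p.2.items))

-- ===== PRECONDITION & SPEC =====
def Spec_get_dictionary_by_year (list_of_tuples : List (String × String × String × String)) (out : List (String × List (String × List String))) : Prop := out = get_dictionary_by_year_alt list_of_tuples
instance (list_of_tuples : List (String × String × String × String)) (out : List (String × List (String × List String))) : Decidable (Spec_get_dictionary_by_year list_of_tuples out) := by unfold Spec_get_dictionary_by_year; infer_instance

-- ===== CLAIM (what is proved, stated in full; the proofs are below) =====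
def Claim_equal_get_dictionary_by_year : Prop := ∀ (list_of_tuples : List (String × String × String × String)), Dom_get_dictionary_by_year list_of_tuples → Spec_get_dictionary_by_year list_of_tuples (get_dictionary_by_year list_of_tuples)

-- ===== LEMMAS AND PROOFS =====

-- the two outer folds, abbreviated for the proofs
def pvFoldA (full xs : List (String × String × String × String))
    (d : PySem.Dict String (PySem.Dict String (List String))) :
    PySem.Dict String (PySem.Dict String (List String)) :=
  xs.foldl (fun d t => d.insert t.2.1 (pvInnerA full t.2.1)) d

def pvFoldB (xs : List (String × String × String × String))
    (d : PySem.Dict String (PySem.Dict String (List String))) :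
    PySem.Dict String (PySem.Dict String (List String)) :=
  xs.foldl (fun d t => d.modify t.2.1 PySem.Dict.empty (fun inner => inner.insert t.1 [t.2.2.1, t.2.2.2])) d

-- B's getD at any year is exactly A's inner fold started from the current value
theorem pvFoldB_getD (xs : List (String × String × String × String))
    (d : PySem.Dict String (PySem.Dict String (List String))) (y : String) :
    (pvFoldB xs d).getD y PySem.Dict.empty =
      xs.foldl (fun dd t => if t.2.1 = y then dd.insert t.1 [t.2.2.1, t.2.2.2] else dd)
        (d.getD y PySem.Dict.empty) := by
  induction xs generalizing d with
  | nil => rfl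
  | cons t xs ih =>
      simp only [pvFoldB, List.foldl_cons] at *
      rw [ih]
      congr 1
      rw [PySem.Dict.getD_modify]
      by_cases h : t.2.1 = y
      · simp [h]
      · simp [h, Ne.symm h]

theorem pvFoldA_getD (full xs : List (String × String × String × String))
    (d : PySem.Dict String (PySem.Dict String (List String))) (y : String) :
    (pvFoldA full xs d).getD y PySem.Dict.empty =
      if y ∈ xs.map (·.2.1) then pvInnerA full y else d.getD y PySem.Dict.empty := by
  induction xs generalizing d with
  | nil => simp [pvFoldA]
  | cons t xs ih =>
      simp only [pvFoldA, List.foldl_cons] at *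
      rw [ih]
      by_cases hmem : y ∈ xs.map (·.2.1)
      · simp [hmem]
      · by_cases h : y = t.2.1
        · simp [hmem, h, PySem.Dict.getD_insert]
        · simp [hmem, h, PySem.Dict.getD_insert]

theorem pvFold_eq (xs : List (String × String × String × String)) :
    pvFoldA xs xs PySem.Dict.empty = pvFoldB xs PySem.Dict.empty := by
  apply PySem.Dict.ext
  have hkA : (pvFoldA xs xs PySem.Dict.empty).keys
      = PySem.Set.update (PySem.Dict.empty : PySem.Dict String (PySem.Dict String (List String))).keys (xs.map (·.2.1)) :=
    PySem.Dict.keys_foldl_insert_key xs (·.2.1) (fun _ t => pvInnerA xs t.2.1) _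
  have hkB : (pvFoldB xs PySem.Dict.empty).keys
      = PySem.Set.update (PySem.Dict.empty : PySem.Dict String (PySem.Dict String (List String))).keys (xs.map (·.2.1)) :=
    PySem.Dict.keys_foldl_modify_key xs (·.2.1) _ _ _
  have hndA : (pvFoldA xs xs PySem.Dict.empty).keys.Nodup :=
    PySem.Dict.nodup_keys_foldl_insert_key xs (·.2.1) _ _ PySem.Dict.nodup_keys_empty
  have hndB : (pvFoldB xs PySem.Dict.empty).keys.Nodup :=
    PySem.Dict.nodup_keys_foldl_modify_key xs (·.2.1) _ _ _ PySem.Dict.nodup_keys_empty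
  rw [PySem.Dict.items_eq_map_keys _ hndA PySem.Dict.empty,
      PySem.Dict.items_eq_map_keys _ hndB PySem.Dict.empty, hkA, hkB]
  apply List.map_congr_left
  intro y hy
  have hy' : y ∈ xs.map (·.2.1) := by
    rcases (PySem.Set.mem_update _ _ _).1 hy with h | h
    · simp [PySem.Dict.keys_empty] at h
    · exact h
  rw [pvFoldA_getD, pvFoldB_getD, if_pos hy']
  simp [pvInnerA, PySem.Dict.getD_empty]

-- ===== VERDICT (by name: the statement is the Claim_ definition above) =====
theorem get_dictionary_by_year_spec : Claim_equal_get_dictionary_by_year := by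
  intro xs _
  show get_dictionary_by_year xs = get_dictionary_by_year_alt xs
  unfold get_dictionary_by_year get_dictionary_by_year_alt
  rw [show (xs.foldl (fun d t => d.insert t.2.1 (pvInnerA xs t.2.1)) PySem.Dict.empty)
        = pvFoldA xs xs PySem.Dict.empty from rfl,
      pvFold_eq]
  rfl
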